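-- pv_equiv track=rewrite | github.com/thanhan910/MATA-AND-OR | iGenProblem.py | calc_constraints
-- ===== SOURCE A (Python) =====
-- def calc_constraints(agents_capIds, task_caps):
--     """
--     Calculate the constraints of the system, where the system consists of tasks and agents with constraints.
--     """
--     agents_taskIds = { i: [] for i in agents_capIds }
--     tasks_agentIds = { j: [] for j in task_caps }
--     for i, a_caps in agents_capIds.items():
--         for j, t_caps in task_caps.items():
--             if set(t_caps).issubset(a_caps):
--                 agents_taskIds[i].append(j)
--                 tasks_agentIds[j].append(i)
--     return agents_taskIds, tasks_agentIds
-- ===== SOURCE B (Python) =====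
-- def calc_constraints(agents_capIds, task_caps):
--     # Inverted index: capability -> set of agent ids that have it; each task's
--     # qualifying-agent set is then one set-intersection, and the two output
--     # dicts are assembled by comprehensions in the original insertion orders.
--     cap_to_agents = {}
--     for i, caps in agents_capIds.items():
--         for c in caps:
--             cap_to_agents.setdefault(c, set()).add(i)
--     all_agents = set(agents_capIds)
--     qual = {}
--     for j, t_caps in task_caps.items():
--         q = all_agents
--         for c in t_caps:
--             q = q & cap_to_agents.get(c, set())
--         qual[j] = q
--     agents_taskIds = {i: [j for j in task_caps if i in qual[j]] for i in agents_capIds}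
--     tasks_agentIds = {j: [i for i in agents_capIds if i in qual[j]] for j in task_caps}
--     return agents_taskIds, tasks_agentIds
-- ===== Notes on version B (the rewrite author's own statement) =====
-- stated objective: faster
-- what changed: Replaces the per-pair set(t_caps).issubset(a_caps) subset test of the nested loop by an inverted index capability->agents built in one pass, so each task's qualifying-agent set is computed once by set intersection and the output dicts are assembled by comprehensions over the original key orders.
import Mathlib
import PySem

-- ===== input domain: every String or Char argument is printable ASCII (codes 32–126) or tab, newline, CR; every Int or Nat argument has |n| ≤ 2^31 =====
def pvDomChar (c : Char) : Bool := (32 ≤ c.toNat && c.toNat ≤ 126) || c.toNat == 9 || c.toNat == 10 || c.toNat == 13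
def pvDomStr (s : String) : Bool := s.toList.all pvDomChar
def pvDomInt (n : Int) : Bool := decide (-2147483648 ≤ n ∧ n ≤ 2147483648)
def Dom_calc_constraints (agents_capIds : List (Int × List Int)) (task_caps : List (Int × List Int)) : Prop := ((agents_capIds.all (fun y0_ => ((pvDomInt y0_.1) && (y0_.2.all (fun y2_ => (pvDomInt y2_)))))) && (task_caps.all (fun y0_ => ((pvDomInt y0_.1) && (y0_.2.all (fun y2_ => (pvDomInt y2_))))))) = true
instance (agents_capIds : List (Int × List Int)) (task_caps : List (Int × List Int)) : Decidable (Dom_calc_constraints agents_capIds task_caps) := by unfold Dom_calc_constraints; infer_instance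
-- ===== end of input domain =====

-- B replaces A's per-pair subset test by an inverted capability→agents index and
-- one set-intersection per task (equivalence of the RETURN value; both are pure).

-- ===== PORT A =====
-- literal port: the two dict comprehensions, then the nested for-loop appending
-- into both dicts whenever set(t_caps).issubset(a_caps)
def calc_constraints (agents_capIds : List (Int × List Int)) (task_caps : List (Int × List Int)) : (List (Int × List Int)) × (List (Int × List Int)) :=
  let agents_taskIds : PySem.Dict Int (List Int) :=
    agents_capIds.foldl (fun d p => d.insert p.1 []) PySem.Dict.empty
  let tasks_agentIds : PySem.Dict Int (List Int) :=
    task_caps.foldl (fun d q => d.insert q.1 []) PySem.Dict.empty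
  let st :=
    agents_capIds.foldl (fun st p =>
      task_caps.foldl (fun st q =>
        if PySem.Set.issubset (PySem.Set.ofList q.2) p.2 then
          (st.1.modify p.1 [] (· ++ [q.1]), st.2.modify q.1 [] (· ++ [p.1]))
        else st) st) (agents_taskIds, tasks_agentIds)
  (st.1.items, st.2.items)

-- ===== PORT B =====
-- literal port of Source B: inverted index cap→agents (setdefault+add = Dict.modify),
-- all_agents, per-task qualifying set by intersection, then the two dict
-- comprehensions over the original key orders ('qual[j]' is total here: every
-- task key was inserted into qual, so getD's default is never consulted)
def calc_constraints_alt (agents_capIds : List (Int × List Int)) (task_caps : List (Int × List Int)) : (List (Int × List Int)) × (List (Int × List Int)) :=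
  let capToAgents : PySem.Dict Int (PySem.Set Int) :=
    agents_capIds.foldl (fun d p =>
      p.2.foldl (fun d c => d.modify c PySem.Set.empty (fun s => PySem.Set.add s p.1)) d)
      PySem.Dict.empty
  let allAgents : PySem.Set Int := PySem.Set.ofList (agents_capIds.map (·.1))
  let qual : PySem.Dict Int (PySem.Set Int) :=
    task_caps.foldl (fun d q =>
      d.insert q.1 (q.2.foldl (fun s c => PySem.Set.inter s (capToAgents.getD c PySem.Set.empty)) allAgents))
      PySem.Dict.empty
  let agents_taskIds : PySem.Dict Int (List Int) :=
    agents_capIds.foldl (fun d p =>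
      d.insert p.1 ((task_caps.filter (fun q => PySem.Set.contains (qual.getD q.1 PySem.Set.empty) p.1)).map (·.1)))
      PySem.Dict.empty
  let tasks_agentIds : PySem.Dict Int (List Int) :=
    task_caps.foldl (fun d q =>
      d.insert q.1 ((agents_capIds.filter (fun p => PySem.Set.contains (qual.getD q.1 PySem.Set.empty) p.1)).map (·.1)))
      PySem.Dict.empty
  (agents_taskIds.items, tasks_agentIds.items)

-- ===== PRECONDITION & SPEC =====
-- Pre_ excludes association lists with duplicate keys: they do not represent any
-- Python dict (both arguments are dicts, whose keys are unique), so no Python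
-- input is excluded.
def Pre_calc_constraints (agents_capIds : List (Int × List Int)) (task_caps : List (Int × List Int)) : Prop :=
  (agents_capIds.map (·.1)).Nodup ∧ (task_caps.map (·.1)).Nodup
instance (agents_capIds : List (Int × List Int)) (task_caps : List (Int × List Int)) : Decidable (Pre_calc_constraints agents_capIds task_caps) := by unfold Pre_calc_constraints; infer_instance
def pvWitness_calc_constraints : (List (Int × List Int)) × (List (Int × List Int)) :=
  ([(1, [10, 11]), (2, [10])], [(7, [10]), (8, [10, 11]), (9, [])])
def Spec_calc_constraints (agents_capIds : List (Int × List Int)) (task_caps : List (Int × List Int)) (out : (List (Int × List Int)) × (List (Int × List Int))) : Prop := out = calc_constraints_alt agents_capIds task_caps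
instance (agents_capIds : List (Int × List Int)) (task_caps : List (Int × List Int)) (out : (List (Int × List Int)) × (List (Int × List Int))) : Decidable (Spec_calc_constraints agents_capIds task_caps out) := by unfold Spec_calc_constraints; infer_instance

-- ===== CLAIM (what is proved, stated in full; the proofs are below) =====
def Claim_equal_calc_constraints : Prop := ∀ (agents_capIds : List (Int × List Int)) (task_caps : List (Int × List Int)), Dom_calc_constraints agents_capIds task_caps → Pre_calc_constraints agents_capIds task_caps → Spec_calc_constraints agents_capIds task_caps (calc_constraints agents_capIds task_caps)

-- ===== LEMMAS AND PROOFS =====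

-- helper names for A's loop shapes (proof-only)
def pvSub (tc ac : List Int) : Bool := PySem.Set.issubset (PySem.Set.ofList tc) ac

def pvMod (d : PySem.Dict Int (List Int)) (pr : Int × Int) : PySem.Dict Int (List Int) :=
  d.modify pr.1 [] (· ++ [pr.2])

def pvPairs1 (A T : List (Int × List Int)) : List (Int × Int) :=
  A.flatMap (fun p => (T.filter (fun q => pvSub q.2 p.2)).map (fun q => (p.1, q.1)))

def pvPairs2 (A T : List (Int × List Int)) : List (Int × Int) :=
  A.flatMap (fun p => (T.filter (fun q => pvSub q.2 p.2)).map (fun q => (q.1, p.1)))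

-- one agent's inner loop, split into the two dict components
theorem pv_inner (T : List (Int × List Int)) (p : Int × List Int)
    (st : PySem.Dict Int (List Int) × PySem.Dict Int (List Int)) :
    T.foldl (fun st q =>
        if PySem.Set.issubset (PySem.Set.ofList q.2) p.2 then
          (st.1.modify p.1 [] (· ++ [q.1]), st.2.modify q.1 [] (· ++ [p.1]))
        else st) st
    = (((T.filter (fun q => pvSub q.2 p.2)).map (fun q => ((p.1, q.1) : Int × Int))).foldl pvMod st.1,
       ((T.filter (fun q => pvSub q.2 p.2)).map (fun q => ((q.1, p.1) : Int × Int))).foldl pvMod st.2) := by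
  induction T generalizing st with
  | nil => simp
  | cons q T ih =>
    by_cases h : pvSub q.2 p.2
    · have h' : PySem.Set.issubset (PySem.Set.ofList q.2) p.2 = true := h
      simp only [List.foldl_cons, List.filter_cons, h, h', if_true, List.map_cons, ih, pvMod]
    · have h' : PySem.Set.issubset (PySem.Set.ofList q.2) p.2 = false := by
        simpa using h
      simp only [List.foldl_cons, List.filter_cons, h, h', Bool.false_eq_true, if_false, ih]

-- the whole double loop, flattened to two independent modify-folds
theorem pv_flatten (A T : List (Int × List Int))
    (st : PySem.Dict Int (List Int) × PySem.Dict Int (List Int)) :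
    A.foldl (fun st p =>
      T.foldl (fun st q =>
        if PySem.Set.issubset (PySem.Set.ofList q.2) p.2 then
          (st.1.modify p.1 [] (· ++ [q.1]), st.2.modify q.1 [] (· ++ [p.1]))
        else st) st) st
    = ((pvPairs1 A T).foldl pvMod st.1, (pvPairs2 A T).foldl pvMod st.2) := by
  induction A generalizing st with
  | nil => simp [pvPairs1, pvPairs2]
  | cons p A ih =>
    rw [List.foldl_cons, pv_inner, ih]
    simp only [pvPairs1, pvPairs2, List.flatMap_cons, List.foldl_append]

-- the initial {k: [] for k in L} dict: every getD is []
theorem pv_init_getD (L : List (Int × List Int)) (d : PySem.Dict Int (List Int))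
    (hd : ∀ k, d.getD k [] = []) (k : Int) :
    (L.foldl (fun d p => d.insert p.1 []) d).getD k [] = [] := by
  induction L generalizing d with
  | nil => exact hd k
  | cons p L ih =>
    refine ih _ (fun k' => ?_)
    rw [PySem.Dict.getD_insert]
    split <;> simp [hd]

theorem pv_update_of_subset (s : PySem.Set Int) (xs : List Int) (h : ∀ x ∈ xs, x ∈ s) :
    s.update xs = s := by
  rw [PySem.Set.update_eq_append_filter]
  have : (PySem.Set.ofList xs).filter (fun y => !(PySem.Set.contains s y)) = [] := by
    rw [List.filter_eq_nil_iff]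
    intro y hy
    have : y ∈ s := h y ((PySem.Set.mem_ofList xs y).mp hy)
    simp [PySem.Set.contains_eq_listContains, this]
  rw [this, List.append_nil]

-- key-filter on an association list
theorem pv_filter_key_nil {ν : Type} (l : List (Int × ν)) (k : Int)
    (h : k ∉ l.map (·.1)) : l.filter (fun p => p.1 == k) = [] := by
  rw [List.filter_eq_nil_iff]
  intro p hp
  simp only [beq_iff_eq]
  intro hk
  exact h (List.mem_map.mpr ⟨p, hp, hk⟩)

theorem pv_filter_key_single {ν : Type} (l : List (Int × ν)) (k : Int) (v : ν)
    (hnd : (l.map (·.1)).Nodup) (hm : (k, v) ∈ l) :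
    l.filter (fun p => p.1 == k) = [(k, v)] := by
  induction l with
  | nil => cases hm
  | cons r l ih =>
    simp only [List.map_cons, List.nodup_cons] at hnd
    rcases List.mem_cons.mp hm with hm | hm
    · subst hm
      simp [pv_filter_key_nil l k hnd.1]
    · have hne : r.1 ≠ k := by
        intro he
        exact hnd.1 (he ▸ List.mem_map.mpr ⟨(k, v), hm, rfl⟩)
      simp [hne, ih hnd.2 hm]

theorem pv_pairs1_key_nil (A T : List (Int × List Int)) (k : Int)
    (h : k ∉ A.map (·.1)) : (pvPairs1 A T).filter (fun pr => pr.1 == k) = [] := by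
  rw [List.filter_eq_nil_iff]
  intro pr hpr
  simp only [pvPairs1, List.mem_flatMap, List.mem_map, List.mem_filter] at hpr
  obtain ⟨p, hp, q, hq, rfl⟩ := hpr
  simp only [beq_iff_eq]
  intro hk
  exact h (List.mem_map.mpr ⟨p, hp, hk⟩)

theorem pv_pairs1_filter (A T : List (Int × List Int)) (p : Int × List Int)
    (hnd : (A.map (·.1)).Nodup) (hp : p ∈ A) :
    ((pvPairs1 A T).filter (fun pr => pr.1 == p.1)).map (·.2)
      = (T.filter (fun q => pvSub q.2 p.2)).map (·.1) := by
  induction A with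
  | nil => cases hp
  | cons r A ih =>
    simp only [List.map_cons, List.nodup_cons] at hnd
    have hsplit : pvPairs1 (r :: A) T
        = ((T.filter (fun q => pvSub q.2 r.2)).map (fun q => ((r.1, q.1) : Int × Int)))
            ++ pvPairs1 A T := by
      simp [pvPairs1]
    rw [hsplit, List.filter_append, List.map_append]
    rcases List.mem_cons.mp hp with hp | hp
    · subst hp
      have h1 : ((T.filter (fun q => pvSub q.2 p.2)).map (fun q => ((p.1, q.1) : Int × Int))).filter
          (fun pr => pr.1 == p.1) = (T.filter (fun q => pvSub q.2 p.2)).map (fun q => ((p.1, q.1) : Int × Int)) := by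
        rw [List.filter_eq_self]
        intro pr hpr
        simp only [List.mem_map] at hpr
        obtain ⟨q, _, rfl⟩ := hpr
        simp
      rw [h1, pv_pairs1_key_nil A T p.1 hnd.1]
      simp [List.map_map, Function.comp]
    · have hne : r.1 ≠ p.1 := by
        intro he
        exact hnd.1 (he ▸ List.mem_map.mpr ⟨p, hp, rfl⟩)
      have h1 : ((T.filter (fun q => pvSub q.2 r.2)).map (fun q => ((r.1, q.1) : Int × Int))).filter
          (fun pr => pr.1 == p.1) = [] := by
        rw [List.filter_eq_nil_iff]
        intro pr hpr
        simp only [List.mem_map] at hpr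
        obtain ⟨q, _, rfl⟩ := hpr
        simpa using hne
      rw [h1]
      simpa using ih hnd.2 hp

theorem pv_pairs2_filter (A T : List (Int × List Int)) (q : Int × List Int)
    (hndT : (T.map (·.1)).Nodup) (hq : q ∈ T) :
    ((pvPairs2 A T).filter (fun pr => pr.1 == q.1)).map (·.2)
      = (A.filter (fun p => pvSub q.2 p.2)).map (·.1) := by
  induction A with
  | nil => simp [pvPairs2]
  | cons p A ih =>
    simp only [pvPairs2, List.flatMap_cons, List.filter_append, List.map_append]
    have h1 : ((T.filter (fun t => pvSub t.2 p.2)).map (fun t => ((t.1, p.1) : Int × Int))).filter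
        (fun pr => pr.1 == q.1)
        = ((T.filter (fun t => pvSub t.2 p.2)).filter (fun t => t.1 == q.1)).map
            (fun t => ((t.1, p.1) : Int × Int)) := by
      rw [List.filter_map]
      rfl
    have h2 : (T.filter (fun t => pvSub t.2 p.2)).filter (fun t => t.1 == q.1)
        = (T.filter (fun t => t.1 == q.1)).filter (fun t => pvSub t.2 p.2) := by
      rw [List.filter_filter, List.filter_filter]
      exact List.filter_congr (fun t _ => Bool.and_comm _ _)
    rw [h1, h2, pv_filter_key_single T q.1 q.2 hndT hq]
    by_cases hs : pvSub q.2 p.2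
    · simp only [List.filter_cons, List.filter_nil, hs, if_true, List.map_cons, List.map_nil,
        List.filter_cons]
      simpa [pvPairs2, hs] using congrArg (List.cons p.1) (ih)
    · have hs' : pvSub q.2 p.2 = false := by simpa using hs
      simp only [List.filter_cons, List.filter_nil, hs', Bool.false_eq_true, if_false,
        List.map_nil, List.nil_append]
      simpa [pvPairs2, hs'] using ih

-- B-side: membership in the inverted index
theorem pv_cap_mem_one (cs : List Int) (i : Int) (d : PySem.Dict Int (PySem.Set Int))
    (c x : Int) :
    x ∈ (cs.foldl (fun d c' => d.modify c' PySem.Set.empty (fun s => PySem.Set.add s i)) d).getD c PySem.Set.empty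
      ↔ x ∈ d.getD c PySem.Set.empty ∨ (c ∈ cs ∧ x = i) := by
  induction cs generalizing d with
  | nil => simp
  | cons c' cs ih =>
    simp only [List.foldl_cons, ih, PySem.Dict.getD_modify, List.mem_cons]
    by_cases h : c = c'
    · subst h
      simp [PySem.Set.mem_add]
      tauto
    · simp only [h, if_false]
      tauto

theorem pv_cap_mem (A : List (Int × List Int)) (d : PySem.Dict Int (PySem.Set Int)) (c x : Int) :
    x ∈ (A.foldl (fun d p =>
          p.2.foldl (fun d c' => d.modify c' PySem.Set.empty (fun s => PySem.Set.add s p.1)) d) d).getD c PySem.Set.empty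
      ↔ x ∈ d.getD c PySem.Set.empty ∨ ∃ r ∈ A, c ∈ r.2 ∧ x = r.1 := by
  induction A generalizing d with
  | nil => simp
  | cons p A ih =>
    simp only [List.foldl_cons, ih, pv_cap_mem_one, List.mem_cons]
    constructor
    · rintro ((hx | ⟨hc, rfl⟩) | ⟨r, hr, hcr, rfl⟩)
      · exact Or.inl hx
      · exact Or.inr ⟨p, Or.inl rfl, hc, rfl⟩
      · exact Or.inr ⟨r, Or.inr hr, hcr, rfl⟩
    · rintro (hx | ⟨r, hr, hcr, rfl⟩)
      · exact Or.inl (Or.inl hx)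
      · rcases hr with rfl | hr
        · exact Or.inl (Or.inr ⟨hcr, rfl⟩)
        · exact Or.inr ⟨r, hr, hcr, rfl⟩

-- B-side: membership in the intersection fold
theorem pv_qual_mem (caps : List Int) (cap2a : PySem.Dict Int (PySem.Set Int))
    (s : PySem.Set Int) (x : Int) :
    x ∈ caps.foldl (fun s c => PySem.Set.inter s (cap2a.getD c PySem.Set.empty)) s
      ↔ x ∈ s ∧ ∀ c ∈ caps, x ∈ cap2a.getD c PySem.Set.empty := by
  induction caps generalizing s with
  | nil => simp
  | cons c caps ih =>
    simp only [List.foldl_cons, ih, PySem.Set.mem_inter, List.mem_cons]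
    constructor
    · rintro ⟨⟨hs, hc⟩, h⟩
      exact ⟨hs, fun c' hc' => hc'.elim (fun he => he ▸ hc) (h c')⟩
    · rintro ⟨hs, h⟩
      exact ⟨⟨hs, h c (Or.inl rfl)⟩, fun c' hc' => h c' (Or.inr hc')⟩

-- the pointwise agreement of the two qualification tests
theorem pv_contains_qual (A : List (Int × List Int)) (hndA : (A.map (·.1)).Nodup)
    (p : Int × List Int) (hp : p ∈ A) (tcaps : List Int) :
    PySem.Set.contains
      (tcaps.foldl (fun s c =>
          PySem.Set.inter s
            ((A.foldl (fun d r =>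
                r.2.foldl (fun d c' => d.modify c' PySem.Set.empty (fun s => PySem.Set.add s r.1)) d)
                PySem.Dict.empty).getD c PySem.Set.empty))
        (PySem.Set.ofList (A.map (·.1)))) p.1
      = pvSub tcaps p.2 := by
  rw [Bool.eq_iff_iff]
  rw [PySem.Set.contains_iff, pv_qual_mem]
  unfold pvSub
  rw [PySem.Set.issubset_iff]
  constructor
  · rintro ⟨-, h⟩ c hc
    have hc' : c ∈ tcaps := (PySem.Set.mem_ofList _ _).mp hc
    have := (pv_cap_mem A PySem.Dict.empty c p.1).mp (h c hc')
    simp only [PySem.Dict.getD_empty] at this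
    rcases this with h0 | ⟨r, hr, hcr, he⟩
    · cases h0
    · have : r = p := List.inj_on_of_nodup_map hndA hr hp he.symm
      exact this ▸ hcr
  · intro h
    refine ⟨(PySem.Set.mem_ofList _ _).mpr (List.mem_map.mpr ⟨p, hp, rfl⟩), fun c hc => ?_⟩
    refine (pv_cap_mem A PySem.Dict.empty c p.1).mpr (Or.inr ⟨p, hp, ?_, rfl⟩)
    exact h c ((PySem.Set.mem_ofList _ _).mpr hc)
theorem pv_init_keys (L : List (Int × List Int)) :
    (L.foldl (fun d p => d.insert p.1 ([] : List Int)) PySem.Dict.empty).keys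
      = PySem.Set.ofList (L.map (·.1)) := by
  rw [PySem.Dict.keys_foldl_insert_key L (·.1) (fun _ _ => []) PySem.Dict.empty,
    PySem.Dict.keys_empty]
  exact PySem.Set.update_nil_left _

theorem pv_modifyfold_keys (l : List (Int × Int)) (d : PySem.Dict Int (List Int))
    (h : ∀ pr ∈ l, pr.1 ∈ d.keys) : (l.foldl pvMod d).keys = d.keys := by
  unfold pvMod
  rw [PySem.Dict.keys_foldl_modify_key l (·.1) [] (fun _ pr v => v ++ [pr.2]) d]
  refine pv_update_of_subset _ _ (fun x hx => ?_)
  obtain ⟨pr, hpr, rfl⟩ := List.mem_map.mp hx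
  exact h pr hpr

theorem pv_modifyfold_getD (l : List (Int × Int)) (d : PySem.Dict Int (List Int)) (c : Int) :
    (l.foldl pvMod d).getD c [] = d.getD c [] ++ (l.filter (fun p => p.1 == c)).map (·.2) := by
  unfold pvMod
  exact PySem.Dict.getD_foldl_modify_append l d c

theorem pv_pairs1_keys_mem (A T : List (Int × List Int)) (pr : Int × Int)
    (h : pr ∈ pvPairs1 A T) : pr.1 ∈ A.map (·.1) := by
  simp only [pvPairs1, List.mem_flatMap, List.mem_map] at h
  obtain ⟨p, hp, q, _, rfl⟩ := h
  exact List.mem_map.mpr ⟨p, hp, rfl⟩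

theorem pv_pairs2_keys_mem (A T : List (Int × List Int)) (pr : Int × Int)
    (h : pr ∈ pvPairs2 A T) : pr.1 ∈ T.map (·.1) := by
  simp only [pvPairs2, List.mem_flatMap, List.mem_map] at h
  obtain ⟨p, _, q, hq, rfl⟩ := h
  exact List.mem_map.mpr ⟨q, List.mem_of_mem_filter hq, rfl⟩

theorem pv_qual_getD (T : List (Int × List Int)) (hndT : (T.map (·.1)).Nodup)
    (cap2a : PySem.Dict Int (PySem.Set Int)) (s0 : PySem.Set Int)
    (q : Int × List Int) (hq : q ∈ T) :
    (T.foldl (fun d r =>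
        d.insert r.1 (r.2.foldl (fun s c => PySem.Set.inter s (cap2a.getD c PySem.Set.empty)) s0))
        PySem.Dict.empty).getD q.1 PySem.Set.empty
      = q.2.foldl (fun s c => PySem.Set.inter s (cap2a.getD c PySem.Set.empty)) s0 := by
  have hitems := PySem.Dict.items_foldl_insert_fresh T (·.1)
      (fun r => r.2.foldl (fun s c => PySem.Set.inter s (cap2a.getD c PySem.Set.empty)) s0)
      PySem.Dict.empty (fun a _ => PySem.Dict.contains_empty _) hndT
  apply PySem.Dict.getD_of_mem_items
  · rw [hitems, show (PySem.Dict.empty : PySem.Dict Int (PySem.Set Int)).items = [] from rfl,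
      List.nil_append]
    exact List.mem_map.mpr ⟨q, hq, rfl⟩
  · exact PySem.Dict.nodup_keys_foldl_insert_key T (·.1) _ PySem.Dict.empty (by simp [PySem.Dict.keys_empty])

theorem pv_main (A T : List (Int × List Int)) (hndA : (A.map (·.1)).Nodup)
    (hndT : (T.map (·.1)).Nodup) :
    calc_constraints A T = calc_constraints_alt A T := by
  unfold calc_constraints calc_constraints_alt
  simp only []
  rw [pv_flatten]
  have hkeysA : ((pvPairs1 A T).foldl pvMod
      (A.foldl (fun d p => d.insert p.1 []) PySem.Dict.empty)).keys = A.map (·.1) := by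
    rw [pv_modifyfold_keys, pv_init_keys, PySem.Set.ofList_eq_self_of_nodup _ hndA]
    intro pr hpr
    rw [pv_init_keys]
    exact (PySem.Set.mem_ofList _ _).mpr (pv_pairs1_keys_mem A T pr hpr)
  have hkeysT : ((pvPairs2 A T).foldl pvMod
      (T.foldl (fun d q => d.insert q.1 []) PySem.Dict.empty)).keys = T.map (·.1) := by
    rw [pv_modifyfold_keys, pv_init_keys, PySem.Set.ofList_eq_self_of_nodup _ hndT]
    intro pr hpr
    rw [pv_init_keys]
    exact (PySem.Set.mem_ofList _ _).mpr (pv_pairs2_keys_mem A T pr hpr)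
  refine Prod.ext ?_ ?_
  · -- agents_taskIds component
    show ((pvPairs1 A T).foldl pvMod _).items = _
    rw [PySem.Dict.items_eq_map_keys _ (hkeysA ▸ hndA) [], hkeysA]
    rw [PySem.Dict.items_foldl_insert_fresh A (·.1) _ PySem.Dict.empty
      (fun a _ => PySem.Dict.contains_empty _) hndA]
    rw [List.map_map]
    rw [show (PySem.Dict.empty : PySem.Dict Int (List Int)).items = [] from rfl, List.nil_append]
    refine List.map_congr_left (fun p hp => ?_)
    simp only [Function.comp]
    refine Prod.ext rfl ?_
    show ((pvPairs1 A T).foldl pvMod _).getD p.1 [] = _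
    rw [pv_modifyfold_getD, pv_init_getD _ _ (fun k => PySem.Dict.getD_empty k []),
      List.nil_append, pv_pairs1_filter A T p hndA hp]
    refine congrArg _ (List.filter_congr (fun q hq => ?_))
    rw [pv_qual_getD T hndT _ _ q hq, pv_contains_qual A hndA p hp q.2]
  · -- tasks_agentIds component
    show ((pvPairs2 A T).foldl pvMod _).items = _
    rw [PySem.Dict.items_eq_map_keys _ (hkeysT ▸ hndT) [], hkeysT]
    rw [PySem.Dict.items_foldl_insert_fresh T (·.1) _ PySem.Dict.empty
      (fun a _ => PySem.Dict.contains_empty _) hndT]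
    rw [List.map_map]
    rw [show (PySem.Dict.empty : PySem.Dict Int (List Int)).items = [] from rfl, List.nil_append]
    refine List.map_congr_left (fun q hq => ?_)
    simp only [Function.comp]
    refine Prod.ext rfl ?_
    show ((pvPairs2 A T).foldl pvMod _).getD q.1 [] = _
    rw [pv_modifyfold_getD, pv_init_getD _ _ (fun k => PySem.Dict.getD_empty k []),
      List.nil_append, pv_pairs2_filter A T q hndT hq]
    refine congrArg _ (List.filter_congr (fun p hp => ?_))
    rw [pv_qual_getD T hndT _ _ q hq, pv_contains_qual A hndA p hp q.2]

-- ===== VERDICT (by name: the statement is the Claim_ definition above) =====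
theorem calc_constraints_spec : Claim_equal_calc_constraints := by
  intro A T _ hpre
  exact pv_main A T hpre.1 hpre.2
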